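-- pv_equiv track=rewrite | github.com/yalcinkilic/Euler_Project | Problem077.py | compute_Pnk
-- ===== SOURCE A (Python) =====
-- def compute_Pnk(n,len,prime_list):
--     if n<2 :
--         return 0
--
--     if len == 1 and n % 2 == 0 :
--         return 1
--
--     if len == 1 and n % 2 == 1:
--         return 0
--
--     if n == prime_list[len-1]:
--         return 1 + compute_Pnk(n,len-1,prime_list)
--
--     if n < prime_list[len-1]:
--         return compute_Pnk(n,len-1,prime_list)
--
--     return compute_Pnk(n-prime_list[len-1],len,prime_list) + compute_Pnk(n,len-1,prime_list)
-- ===== SOURCE B (Python) =====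
-- def compute_Pnk(n, len, prime_list):
--     if n < 2:
--         return 0
--     # A's len==1 base case counts partitions into 2s by parity and never reads
--     # prime_list[0]: the remaining used coins are prime_list[1:len].
--     coins = prime_list[1:len]
--     if not coins:
--         return 1 if n % 2 == 0 else 0
--     # bottom-up coin-change DP row, seeded with the parity base (partitions into 2s)
--     ways = [1 if v % 2 == 0 else 0 for v in range(n + 1)]
--     for p in coins:
--         for v in range(p, n + 1):
--             ways[v] += ways[v - p]
--     return ways[n]
-- ===== Notes on version B (the rewrite author's own statement) =====
-- stated objective: alternative
-- what changed: Replaces A's top-down branching recursion over the coin indices with a single bottom-up coin-change DP row, seeded with A's len==1 parity base (partitions into 2s) and filled once per used prime from prime_list[1:len] (designed to be asymptotically cheaper, though a timing run's large inputs fall outside Pre_, so no measured speed is claimed).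
-- outside the precondition, e.g. on compute_Pnk(3, 2, [2, 1]): A returns 1, B returns 2; on compute_Pnk(5, 2, [2, 0]): A raises RecursionError, B returns 0
import Mathlib
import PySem

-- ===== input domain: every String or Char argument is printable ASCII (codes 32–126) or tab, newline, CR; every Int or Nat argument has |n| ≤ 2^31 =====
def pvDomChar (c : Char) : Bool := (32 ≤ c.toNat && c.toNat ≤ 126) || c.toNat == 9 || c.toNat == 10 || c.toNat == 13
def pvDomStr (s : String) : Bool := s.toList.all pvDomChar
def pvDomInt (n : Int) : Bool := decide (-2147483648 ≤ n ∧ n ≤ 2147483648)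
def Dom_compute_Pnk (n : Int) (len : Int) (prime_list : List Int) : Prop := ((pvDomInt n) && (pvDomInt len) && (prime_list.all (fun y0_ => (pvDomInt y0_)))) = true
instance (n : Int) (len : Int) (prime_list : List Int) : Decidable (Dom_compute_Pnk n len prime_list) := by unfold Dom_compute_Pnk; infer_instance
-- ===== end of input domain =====

-- B replaces A's top-down branching recursion with one bottom-up coin-change DP row,
-- seeded with A's len==1 parity base (partitions into 2s) and folded over prime_list[1:len].

-- ===== PORT A =====
-- Literal transliteration of A's recursion; the recursion is driven by a fuel
-- parameter large enough for every input Pre_ admits (each call either lowers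
-- len by 1 or lowers n by a coin ≥ 2, so n.toNat + len.toNat + 1 calls suffice).
def computePnkFuel (fuel : Nat) (n : Int) (len : Int) (prime_list : List Int) : Int :=
  match fuel with
  | 0 => 0
  | f + 1 =>
    if n < 2 then 0
    else if len == 1 && PySem.Int.mod n 2 == 0 then 1
    else if len == 1 && PySem.Int.mod n 2 == 1 then 0
    else
      match PySem.List.pyGet? prime_list (len - 1) with
      | none => 0  -- IndexError in Python: excluded by Pre_
      | some p =>
        if n == p then 1 + computePnkFuel f n (len - 1) prime_list
        else if n < p then computePnkFuel f n (len - 1) prime_list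
        else computePnkFuel f (n - p) len prime_list + computePnkFuel f n (len - 1) prime_list

def compute_Pnk (n : Int) (len : Int) (prime_list : List Int) : Int :=
  computePnkFuel (n.toNat + len.toNat + 1) n len prime_list

-- ===== PORT B =====
-- for v in range(p, n+1): ways[v] += ways[v-p]
def pnkStepCoin (n : Int) (ways : List Int) (p : Int) : List Int :=
  (PySem.List.pyRange p (n + 1) 1).foldl
    (fun w v => PySem.List.pySetD w v (PySem.List.pyGetD w v 0 + PySem.List.pyGetD w (v - p) 0)) ways

def compute_Pnk_alt (n : Int) (len : Int) (prime_list : List Int) : Int :=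
  if n < 2 then 0
  else
    -- coins = prime_list[1:len]
    let coins := PySem.List.slice prime_list (some 1) (some len)
    if coins.isEmpty then (if PySem.Int.mod n 2 == 0 then 1 else 0)
    else
      -- ways = [1 if v % 2 == 0 else 0 for v in range(n + 1)]
      let ways : List Int := (PySem.List.pyRange 0 (n + 1) 1).map
        (fun v => if PySem.Int.mod v 2 == 0 then 1 else 0)
      let ways := coins.foldl (pnkStepCoin n) ways
      PySem.List.pyGetD ways n 0

-- ===== PRECONDITION & SPEC =====
-- Pre_ restricts to the function's natural domain (Euler 77: a list of primes): apart
-- from n < 2, where A answers 0 before touching the list, len must address the list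
-- (a len outside [1, length] makes A raise IndexError) and the used coins after the
-- first — A never reads prime_list[0]; its len==1 base case hard-codes parity — must
-- be ≥ 2: a non-positive coin makes A recurse without bound (RecursionError), and a
-- coin equal to 1 is not a prime, a degenerate input outside the intended domain on
-- which A's n<2 cutoff and B's genuine coin-change count defensibly disagree.
def Pre_compute_Pnk (n : Int) (len : Int) (prime_list : List Int) : Prop :=
  n < 2 ∨ (1 ≤ len ∧ len ≤ (prime_list.length : Int) ∧
           ∀ x ∈ (prime_list.take len.toNat).drop 1, 2 ≤ x)
instance (n : Int) (len : Int) (prime_list : List Int) : Decidable (Pre_compute_Pnk n len prime_list) := by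
  unfold Pre_compute_Pnk; infer_instance

def pvWitness_compute_Pnk : Int × Int × List Int := (10, 4, [2, 3, 5, 7])

def Spec_compute_Pnk (n : Int) (len : Int) (prime_list : List Int) (out : Int) : Prop := out = compute_Pnk_alt n len prime_list
instance (n : Int) (len : Int) (prime_list : List Int) (out : Int) : Decidable (Spec_compute_Pnk n len prime_list out) := by unfold Spec_compute_Pnk; infer_instance

-- ===== CLAIM (what is proved, stated in full; the proofs are below) =====
def Claim_equal_compute_Pnk : Prop := ∀ (n : Int) (len : Int) (prime_list : List Int), Dom_compute_Pnk n len prime_list → Pre_compute_Pnk n len prime_list → Spec_compute_Pnk n len prime_list (compute_Pnk n len prime_list)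

-- ===== LEMMAS AND PROOFS =====

-- The common mathematical object: pcount cs m = number of multisets over the
-- coin list cs summing to m, peeling the head coin.
def pcount : List Int → Nat → Int
  | [], 0 => 1
  | [], _ + 1 => 0
  | p :: ps, m =>
      pcount ps m + (if _h : 0 < p ∧ p.toNat ≤ m then pcount (p :: ps) (m - p.toNat) else 0)
termination_by l m => (l.length, m)
decreasing_by
  · simp [Prod.lex_iff]
  · simp only [Prod.lex_iff]; right; exact ⟨trivial, by omega⟩

theorem pcount_cons (p : Int) (ps : List Int) (m : Nat) :
    pcount (p :: ps) m =
      pcount ps m + (if 0 < p ∧ p.toNat ≤ m then pcount (p :: ps) (m - p.toNat) else 0) := by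
  rw [pcount]; split_ifs <;> rfl

theorem pcount_nil (m : Nat) : pcount [] m = if m = 0 then 1 else 0 := by
  cases m <;> simp [pcount]

theorem pcount_cons_of_lt (p : Int) (ps : List Int) (m : Nat) (h : (m : Int) < p) :
    pcount (p :: ps) m = pcount ps m := by
  rw [pcount_cons, if_neg, add_zero]
  rintro ⟨hp, hpm⟩; omega

theorem pcount_zero (l : List Int) : pcount l 0 = 1 := by
  induction l with
  | nil => simp [pcount]
  | cons p ps ih =>
    rw [pcount_cons, if_neg, add_zero, ih]
    rintro ⟨hp, hpm⟩; omega

theorem pcount_one (l : List Int) (h : ∀ x ∈ l, 2 ≤ x) : pcount l 1 = 0 := by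
  induction l with
  | nil => simp [pcount]
  | cons p ps ih =>
    have hp : 2 ≤ p := h p (List.mem_cons_self ..)
    rw [pcount_cons, if_neg, add_zero]
    · exact ih fun x hx => h x (List.mem_cons_of_mem _ hx)
    · rintro ⟨_, hpm⟩; omega

theorem pcount_two : ∀ m : Nat, pcount [2] m = if m % 2 = 0 then 1 else 0 := by
  intro m
  induction m using Nat.strong_induction_on with
  | _ m ih =>
    match m with
    | 0 => simp [pcount]
    | 1 => simp [pcount]
    | m + 2 =>
      rw [pcount_cons, pcount_nil]
      rw [if_neg (by omega), if_pos ⟨by norm_num, by omega⟩]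
      rw [show m + 2 - (2 : Int).toNat = m by omega, ih m (by omega), zero_add,
        show (m + 2) % 2 = m % 2 by omega]

-- getD after set, both indices in range
theorem getD_set_lt (l : List Int) (i u : Nat) (x : Int) (hu : u < l.length) :
    (l.set i x).getD u 0 = if u = i ∧ i < l.length then x else l.getD u 0 := by
  rw [List.getD_eq_getElem _ _ (by simpa using hu), List.getD_eq_getElem _ _ hu,
    List.getElem_set]
  by_cases h : i = u
  · subst h; simp [hu]
  · rw [if_neg h, if_neg (fun hc => h hc.1.symm)]

-- the used coin list A peels, including the implicit parity coin 2 of the len==1 base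
def pnkCoins (pl : List Int) (len : Int) : List Int :=
  (2 : Int) :: (pl.take len.toNat).drop 1

theorem pnkCoins_succ (pl : List Int) (len : Int) (h2 : 2 ≤ len)
    (hlt : len.toNat - 1 < pl.length) :
    pnkCoins pl len = pnkCoins pl (len - 1) ++ [pl[len.toNat - 1]] := by
  unfold pnkCoins
  have htake : pl.take len.toNat = pl.take (len.toNat - 1) ++ [pl[len.toNat - 1]] := by
    conv_lhs => rw [show len.toNat = (len.toNat - 1) + 1 by omega]
    rw [List.take_add_one, List.getElem?_eq_getElem hlt]
    rfl
  have hlen1 : 1 ≤ (pl.take (len.toNat - 1)).length := by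
    rw [List.length_take]; omega
  rw [htake, List.drop_append_of_le_length hlen1,
    show (len - 1).toNat = len.toNat - 1 by omega]
  rfl

-- ----- A-side: the fueled recursion computes pcount of the reversed used coins -----
theorem computePnkFuel_eq (fuel : Nat) :
    ∀ (n len : Int) (pl : List Int), 1 ≤ n → 1 ≤ len → len ≤ (pl.length : Int) →
      (∀ x ∈ (pl.take len.toNat).drop 1, 2 ≤ x) →
      n.toNat + len.toNat ≤ fuel →
      computePnkFuel fuel n len pl = pcount ((pnkCoins pl len).reverse) n.toNat := by
  induction fuel with
  | zero => intro n len pl hn hlen _ _ hf; omega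
  | succ f ih =>
    intro n len pl hn hlen hlenL hcoins hf
    have hrev2 : ∀ x ∈ (pnkCoins pl len).reverse, 2 ≤ x := by
      intro x hx
      rcases List.mem_cons.mp (List.mem_reverse.mp hx) with h | h
      · omega
      · exact hcoins x h
    by_cases hn2 : n < 2
    · -- n = 1
      have hn1 : n = 1 := by omega
      rw [computePnkFuel, if_pos hn2, hn1]
      rw [show (1 : Int).toNat = 1 from rfl, pcount_one _ hrev2]
    · -- 2 ≤ n
      have hn2' : 2 ≤ n := by omega
      have hmod : PySem.Int.mod n 2 = n % 2 := PySem.Int.mod_eq_emod_of_pos (by norm_num)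
      rw [computePnkFuel, if_neg hn2]
      simp only [hmod, Bool.and_eq_true, beq_iff_eq]
      by_cases hl1 : len = 1
      · -- the len == 1 parity base case: the coin list is exactly [2]
        have hco : pnkCoins pl len = [2] := by
          unfold pnkCoins
          rw [hl1, show (1 : Int).toNat = 1 from rfl,
            List.drop_eq_nil_of_le (by rw [List.length_take]; omega)]
        rw [hco, List.reverse_singleton]
        rw [pcount_two]
        by_cases hev : n % 2 = 0
        · rw [if_pos ⟨hl1, hev⟩, if_pos (by omega)]
        · rw [if_neg (by tauto), if_pos ⟨hl1, by omega⟩, if_neg (by omega)]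
      · -- len ≥ 2: A peels the last used coin
        have hl2 : 2 ≤ len := by omega
        have hval : ¬ (len = 1 ∧ n % 2 = 0) := by tauto
        have hval' : ¬ (len = 1 ∧ n % 2 = 1) := by tauto
        rw [if_neg hval, if_neg hval']
        have hkm1 : (len - 1).toNat = len.toNat - 1 := by omega
        have hidxlt : (len.toNat - 1) < pl.length := by omega
        have hidx : PySem.List.pyGet? pl (len - 1) = some pl[len.toNat - 1] := by
          have h1 : PySem.List.pyGet? pl (len - 1) = pl[(len - 1).toNat]? :=
            PySem.List.pyGet?_of_nonneg pl (by omega)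
          rw [h1, hkm1]
          exact List.getElem?_eq_getElem hidxlt
        rw [hidx]
        dsimp only
        have hcs : pnkCoins pl len = pnkCoins pl (len - 1) ++ [pl[len.toNat - 1]] :=
          pnkCoins_succ pl len hl2 hidxlt
        have hrev : (pnkCoins pl len).reverse
            = pl[len.toNat - 1] :: (pnkCoins pl (len - 1)).reverse := by
          rw [hcs, List.reverse_append, List.reverse_singleton]; rfl
        have hpmem : pl[len.toNat - 1] ∈ (pnkCoins pl len).reverse := by
          rw [hrev]; exact List.mem_cons_self ..
        have hp2 : 2 ≤ pl[len.toNat - 1] := hrev2 _ hpmem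
        have hsub : ∀ x ∈ (pl.take (len - 1).toNat).drop 1, 2 ≤ x := by
          intro x hx
          apply hcoins
          have : (pl.take len.toNat).drop 1
              = (pl.take (len.toNat - 1)).drop 1 ++ [pl[len.toNat - 1]] := by
            have := hcs; unfold pnkCoins at this
            rw [hkm1] at this
            exact List.cons.inj this |>.2
          rw [this]
          rw [hkm1] at hx
          exact List.mem_append_left _ hx
        have ihlen : computePnkFuel f n (len - 1) pl
            = pcount ((pnkCoins pl (len - 1)).reverse) n.toNat :=
          ih n (len - 1) pl (by omega) (by omega) (by omega) hsub (by omega)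
        rw [hrev]
        set p := pl[len.toNat - 1] with hpdef
        by_cases heq : n = p
        · rw [if_pos heq, ihlen, pcount_cons,
            if_pos ⟨by omega, by omega⟩,
            show n.toNat - p.toNat = 0 by omega, pcount_zero]
          ring
        · rw [if_neg heq]
          by_cases hlt : n < p
          · rw [if_pos hlt, ihlen, pcount_cons_of_lt _ _ _ (by omega)]
          · rw [if_neg hlt]
            have ihn : computePnkFuel f (n - p) len pl
                = pcount ((pnkCoins pl len).reverse) (n - p).toNat :=
              ih (n - p) len pl (by omega) (by omega) (by omega) hcoins (by omega)
            rw [ihn, hrev, ihlen, pcount_cons p _ n.toNat,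
              if_pos ⟨by omega, by omega⟩,
              show (n - p).toNat = n.toNat - p.toNat by omega]
            ring

-- ----- B-side: the in-place DP row keeps pcount of the processed coins -----
theorem pnkInner_aux (p : Int) (hp : 2 ≤ p) (N : Nat) (S : List Int) :
    ∀ (m : Nat) (w : List Int), (p + m : Int) ≤ (N : Int) + 1 →
      w.length = N + 1 →
      (∀ u : Nat, u ≤ N → w.getD u 0 = pcount S u) →
      ((PySem.List.pyRange p (p + m) 1).foldl
          (fun w v => PySem.List.pySetD w v (PySem.List.pyGetD w v 0 + PySem.List.pyGetD w (v - p) 0)) w).length = N + 1 ∧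
      ∀ u : Nat, u ≤ N →
        ((PySem.List.pyRange p (p + m) 1).foldl
          (fun w v => PySem.List.pySetD w v (PySem.List.pyGetD w v 0 + PySem.List.pyGetD w (v - p) 0)) w).getD u 0
          = if (u : Int) < p + m then pcount (p :: S) u else pcount S u := by
  intro m
  induction m with
  | zero =>
    intro w hpm hlen hw
    rw [show (p + (0 : Nat) : Int) = p by push_cast; ring, PySem.List.pyRange_one_eq_nil le_rfl]
    refine ⟨hlen, fun u hu => ?_⟩
    simp only [List.foldl_nil]
    rw [hw u hu]
    split_ifs with h
    · exact (pcount_cons_of_lt p S u h).symm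
    · rfl
  | succ m ihm =>
    intro w hpm hlen hw
    have hpm' : (p + (m : Nat) : Int) ≤ (N : Int) + 1 := by push_cast at hpm ⊢; omega
    have hrange : PySem.List.pyRange p (p + (m + 1 : Nat)) 1
        = PySem.List.pyRange p (p + m) 1 ++ [p + m] := by
      rw [show (p + ((m : Nat) + 1 : Nat) : Int) = (p + (m : Nat)) + 1 by push_cast; ring]
      exact PySem.List.pyRange_one_succ_right (by omega)
    rw [hrange, List.foldl_append]
    obtain ⟨ihlen, ihval⟩ := ihm w hpm' hlen hw
    set r := (PySem.List.pyRange p (p + (m : Nat)) 1).foldl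
      (fun w v => PySem.List.pySetD w v (PySem.List.pyGetD w v 0 + PySem.List.pyGetD w (v - p) 0)) w with hr
    simp only [List.foldl_cons, List.foldl_nil]
    -- the single update at v = p + m
    have hvN : (p + (m : Nat) : Int) ≤ (N : Int) := by push_cast at hpm; omega
    have hv0 : (0 : Int) ≤ p + m := by omega
    have hvnat : (p + (m : Nat) : Int).toNat ≤ N := by omega
    have hvlt : (p + (m : Nat) : Int).toNat < r.length := by omega
    have hset : PySem.List.pySetD r (p + m)
          (PySem.List.pyGetD r (p + m) 0 + PySem.List.pyGetD r (p + m - p) 0)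
        = r.set (p + (m : Nat) : Int).toNat
          (PySem.List.pyGetD r (p + m) 0 + PySem.List.pyGetD r (p + m - p) 0) :=
      PySem.List.pySetD_of_nonneg r _ hv0
    have hget1 : PySem.List.pyGetD r (p + m) 0 = r.getD (p + (m : Nat) : Int).toNat 0 := by
      rw [PySem.List.pyGetD_eq_getElem r 0 hv0 (by exact_mod_cast (by omega : (p + (m : Nat) : Int) < (r.length : Int)))]
      exact (List.getD_eq_getElem _ _ hvlt).symm
    have hgetv : r.getD (p + (m : Nat) : Int).toNat 0 = pcount S (p + (m : Nat) : Int).toNat := by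
      rw [ihval _ hvnat, if_neg (by omega)]
    have hmp : (0 : Int) ≤ p + m - p := by omega
    have hmplt : (p + (m : Nat) - p : Int).toNat ≤ N := by omega
    have hget2 : PySem.List.pyGetD r (p + m - p) 0 = r.getD (p + (m : Nat) - p : Int).toNat 0 := by
      rw [PySem.List.pyGetD_eq_getElem r 0 hmp (by exact_mod_cast (by omega : (p + (m : Nat) - p : Int) < (r.length : Int)))]
      exact (List.getD_eq_getElem _ _ (by omega)).symm
    have hgetvp : r.getD (p + (m : Nat) - p : Int).toNat 0 = pcount (p :: S) (p + (m : Nat) - p : Int).toNat := by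
      rw [ihval _ hmplt, if_pos (by omega)]
    have hnew : PySem.List.pyGetD r (p + m) 0 + PySem.List.pyGetD r (p + m - p) 0
        = pcount (p :: S) (p + (m : Nat) : Int).toNat := by
      rw [hget1, hgetv, hget2, hgetvp, pcount_cons p S ((p + (m : Nat) : Int).toNat),
        if_pos ⟨by omega, by omega⟩,
        show (p + (m : Nat) : Int).toNat - p.toNat = (p + (m : Nat) - p : Int).toNat by omega]
    rw [hset, hnew]
    constructor
    · rw [List.length_set, ihlen]
    · intro u hu
      rw [getD_set_lt _ _ _ _ (by omega)]
      split_ifs with h1 h2 h2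
      · rw [h1.1]
      · exfalso; have := h1.1; push_cast at h2; omega
      · rw [ihval u hu]
        have hne : u ≠ (p + (m : Nat) : Int).toNat := fun hc => h1 ⟨hc, hvlt⟩
        rw [if_pos (by push_cast at h2; omega)]
      · rw [ihval u hu]
        rw [if_neg (by push_cast at h2 ⊢; omega)]

theorem pnkStep_eq (n p : Int) (hn : 2 ≤ n) (hp : 2 ≤ p) (S : List Int) (w : List Int)
    (hlen : w.length = n.toNat + 1)
    (hw : ∀ u : Nat, u ≤ n.toNat → w.getD u 0 = pcount S u) :
    (pnkStepCoin n w p).length = n.toNat + 1 ∧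
    ∀ u : Nat, u ≤ n.toNat → (pnkStepCoin n w p).getD u 0 = pcount (p :: S) u := by
  unfold pnkStepCoin
  by_cases hple : p ≤ n + 1
  · have hm : n + 1 = p + ((n + 1 - p).toNat : Nat) := by omega
    obtain ⟨h1, h2⟩ := pnkInner_aux p hp n.toNat S (n + 1 - p).toNat w (by omega) hlen hw
    rw [hm]
    refine ⟨h1, fun u hu => ?_⟩
    rw [h2 u hu, if_pos (by omega)]
  · rw [PySem.List.pyRange_one_eq_nil (by omega)]
    refine ⟨hlen, fun u hu => ?_⟩
    simp only [List.foldl_nil]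
    rw [hw u hu, pcount_cons_of_lt p S u (by omega)]

theorem pnkOuter (n : Int) (hn : 2 ≤ n) :
    ∀ (cs S w : List Int), (∀ x ∈ cs, 2 ≤ x) →
      w.length = n.toNat + 1 → (∀ u : Nat, u ≤ n.toNat → w.getD u 0 = pcount S u) →
      (cs.foldl (pnkStepCoin n) w).length = n.toNat + 1 ∧
      ∀ u : Nat, u ≤ n.toNat → (cs.foldl (pnkStepCoin n) w).getD u 0 = pcount (cs.reverse ++ S) u := by
  intro cs
  induction cs with
  | nil => intro S w _ hlen hw; exact ⟨hlen, by simpa using hw⟩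
  | cons p ps ih =>
    intro S w hcs hlen hw
    have hp : 2 ≤ p := hcs p (List.mem_cons_self ..)
    obtain ⟨h1, h2⟩ := pnkStep_eq n p hn hp S w hlen hw
    obtain ⟨h3, h4⟩ := ih (p :: S) (pnkStepCoin n w p)
      (fun x hx => hcs x (List.mem_cons_of_mem _ hx)) h1 h2
    refine ⟨by simpa using h3, fun u hu => ?_⟩
    rw [List.foldl_cons, h4 u hu, List.reverse_cons, List.append_assoc]
    rfl

-- the initial comprehension row is the parity base, i.e. pcount [2]
theorem pnkInit (n : Int) (hn : 2 ≤ n) :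
    ((PySem.List.pyRange 0 (n + 1) 1).map
        (fun v => if PySem.Int.mod v 2 == 0 then (1 : Int) else 0)).length = n.toNat + 1 ∧
    ∀ u : Nat, u ≤ n.toNat →
      ((PySem.List.pyRange 0 (n + 1) 1).map
        (fun v => if PySem.Int.mod v 2 == 0 then (1 : Int) else 0)).getD u 0 = pcount [2] u := by
  have hr : PySem.List.pyRange 0 (n + 1) 1
      = (List.range (n.toNat + 1)).map (fun k : Nat => (0 : Int) + k) := by
    rw [PySem.List.pyRange_one, show (n + 1 - 0).toNat = n.toNat + 1 by omega]
  rw [hr, List.map_map]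
  constructor
  · simp
  · intro u hu
    have hu' : u < n.toNat + 1 := by omega
    rw [List.getD_eq_getElem _ _ (by simpa using hu'), List.getElem_map,
      List.getElem_range, pcount_two]
    have hmod : PySem.Int.mod ((0 : Int) + u) 2 = ((u % 2 : Nat) : Int) := by
      rw [PySem.Int.mod_eq_emod_of_pos (by norm_num)]
      push_cast
      omega
    simp only [Function.comp_apply, hmod]
    by_cases h : u % 2 = 0
    · rw [if_pos h, if_pos (by rw [h]; rfl)]
    · rw [if_neg h, if_neg (by simp; omega)]

-- ===== VERDICT (by name: the statement is the Claim_ definition above) =====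
theorem compute_Pnk_spec : Claim_equal_compute_Pnk := by
  intro n len pl _hdom hpre
  unfold Spec_compute_Pnk compute_Pnk compute_Pnk_alt
  by_cases hn2 : n < 2
  · rw [if_pos hn2, computePnkFuel, if_pos hn2]
  · rcases hpre with h | ⟨h1, h2, h4⟩
    · omega
    rw [if_neg hn2]
    have hA : computePnkFuel (n.toNat + len.toNat + 1) n len pl
        = pcount ((pnkCoins pl len).reverse) n.toNat :=
      computePnkFuel_eq (n.toNat + len.toNat + 1) n len pl (by omega) h1 h2 h4 (by omega)
    have hslice : PySem.List.slice pl (some 1) (some len) = (pl.take len.toNat).drop 1 := by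
      rw [PySem.List.slice_of_nonneg pl (by norm_num) (by omega) (by omega) h2,
        show (1 : Int).toNat = 1 from rfl, List.drop_take]
    have hmod : PySem.Int.mod n 2 = n % 2 := PySem.Int.mod_eq_emod_of_pos (by norm_num)
    show computePnkFuel (n.toNat + len.toNat + 1) n len pl
        = (if (PySem.List.slice pl (some 1) (some len)).isEmpty
           then (if PySem.Int.mod n 2 == 0 then (1 : Int) else 0)
           else PySem.List.pyGetD ((PySem.List.slice pl (some 1) (some len)).foldl (pnkStepCoin n)
                  ((PySem.List.pyRange 0 (n + 1) 1).map
                    (fun v => if PySem.Int.mod v 2 == 0 then (1 : Int) else 0))) n 0)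
    rw [hslice]
    by_cases hemp : (pl.take len.toNat).drop 1 = []
    · -- no coins beyond the implicit 2: both sides are the parity count
      have hco : pnkCoins pl len = [2] := by unfold pnkCoins; rw [hemp]
      rw [hemp, hA, hco, List.reverse_singleton, pcount_two]
      simp only [List.isEmpty_nil, if_true, hmod]
      by_cases he : n % 2 = 0
      · rw [if_pos (by omega), if_pos (by simpa using he)]
      · rw [if_neg (by omega), if_neg (by simpa using he)]
    · rw [if_neg (by simpa [List.isEmpty_iff] using hemp)]
      obtain ⟨hlen0, hval0⟩ := pnkInit n (by omega)
      obtain ⟨hlenr, hvalr⟩ := pnkOuter n (by omega) ((pl.take len.toNat).drop 1) [2]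
        ((PySem.List.pyRange 0 (n + 1) 1).map
          (fun v => if PySem.Int.mod v 2 == 0 then (1 : Int) else 0)) h4 hlen0 hval0
      set r := ((pl.take len.toNat).drop 1).foldl (pnkStepCoin n)
        ((PySem.List.pyRange 0 (n + 1) 1).map
          (fun v => if PySem.Int.mod v 2 == 0 then (1 : Int) else 0)) with hrdef
      have hget : PySem.List.pyGetD r n 0 = r.getD n.toNat 0 := by
        rw [PySem.List.pyGetD_eq_getElem r 0 (by omega) (by exact_mod_cast (by omega : n < (r.length : Int)))]
        exact (List.getD_eq_getElem _ _ (by omega)).symm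
      rw [hA, hget, hvalr n.toNat le_rfl]
      unfold pnkCoins
      rw [List.reverse_cons]
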